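-- pv_equiv track=rewrite | github.com/aman010/nlp_assignments | A1/app.py | pop_numeric
-- ===== SOURCE A (Python) =====
-- def pop_numeric(tokens):
--     """
--     Pops numeric tokens from the list and keeps only non-numeric tokens.
--     """
--     index = 0
--     while index < len(tokens):
--         if tokens[index].isdigit():  # Check if the token is numeric
--             tokens.pop(index)  # Remove numeric token
--         else:
--             index += 1  # Only increment index if we don't pop
--     return tokens
-- ===== SOURCE B (Python) =====
-- def pop_numeric(tokens):
--     """
--     Pops numeric tokens from the list and keeps only non-numeric tokens.
--     Single forward pass: write-pointer compaction in place, then truncate.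
--     """
--     write = 0
--     for read in range(len(tokens)):
--         t = tokens[read]
--         if not t.isdigit():
--             tokens[write] = t
--             write += 1
--     del tokens[write:]
--     return tokens
-- ===== Notes on version B (the rewrite author's own statement) =====
-- stated objective: faster
-- what changed: Replaces the repeated pop(index) (each pop shifts the tail) with a single forward pass using a write-pointer compaction and one final truncation, keeping the in-place mutation of the same list object.
import Mathlib
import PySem

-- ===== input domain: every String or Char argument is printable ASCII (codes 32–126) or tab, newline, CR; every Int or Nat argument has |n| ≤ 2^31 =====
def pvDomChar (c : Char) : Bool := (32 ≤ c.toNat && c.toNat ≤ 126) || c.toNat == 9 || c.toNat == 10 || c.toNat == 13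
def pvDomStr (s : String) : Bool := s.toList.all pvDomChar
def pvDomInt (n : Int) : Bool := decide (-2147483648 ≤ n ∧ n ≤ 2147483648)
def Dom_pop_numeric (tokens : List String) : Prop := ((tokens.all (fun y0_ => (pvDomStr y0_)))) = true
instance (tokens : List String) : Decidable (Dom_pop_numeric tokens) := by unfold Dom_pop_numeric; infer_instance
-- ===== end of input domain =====

-- B replaces A's quadratic pop(index) loop by a one-pass in-place write-pointer compaction (faster); both Pythons mutate the argument list to the same final contents, so the return-value equivalence proved here covers the mutation too.
-- ===== PORT A =====
-- while index < len(tokens): pop(index) if digit else index += 1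
def popLoopA (index : Nat) (tokens : List String) : List String :=
  if h : index < tokens.length then
    if PySem.Str.strIsdigit tokens[index] then
      popLoopA index (tokens.eraseIdx index)
    else
      popLoopA (index + 1) tokens
  else tokens
termination_by tokens.length - index
decreasing_by
  · simp [List.length_eraseIdx, h]; omega
  · omega

def pop_numeric (tokens : List String) : List String := popLoopA 0 tokens

-- ===== PORT B =====
-- for read in range(len(tokens)): if not tokens[read].isdigit(): tokens[write]=tokens[read]; write+=1; del tokens[write:]
def pop_numeric_alt (tokens : List String) : List String :=
  let st := (List.range tokens.length).foldl
    (fun (st : List String × Nat) read =>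
      let t := st.1.getD read ""
      if PySem.Str.strIsdigit t then st
      else (st.1.set st.2 t, st.2 + 1)) (tokens, 0)
  st.1.take st.2

-- ===== PRECONDITION & SPEC =====
def Spec_pop_numeric (tokens : List String) (out : List String) : Prop := out = pop_numeric_alt tokens
instance (tokens : List String) (out : List String) : Decidable (Spec_pop_numeric tokens out) := by unfold Spec_pop_numeric; infer_instance

-- ===== CLAIM (what is proved, stated in full; the proofs are below) =====
def Claim_equal_pop_numeric : Prop := ∀ (tokens : List String), Dom_pop_numeric tokens → Spec_pop_numeric tokens (pop_numeric tokens)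

-- ===== LEMMAS AND PROOFS =====

-- ===== VERDICT (by name: the statement is the Claim_ definition above) =====
theorem take_succ_getElem (l : List String) (i : Nat) (h : i < l.length) :
    l.take (i + 1) = l.take i ++ [l[i]] := by
  rw [List.take_add_one, List.getElem?_eq_getElem h]; rfl

theorem loopA_eq (index : Nat) (tokens : List String) :
    popLoopA index tokens =
      tokens.take index ++ (tokens.drop index).filter (fun t => !PySem.Str.strIsdigit t) := by
  induction index, tokens using popLoopA.induct with
  | case1 index tokens h hd ih =>
    rw [popLoopA]
    simp only [dif_pos h, if_pos hd]
    have hl : (tokens.take index).length = index := by simp [Nat.le_of_lt h]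
    rw [ih, List.eraseIdx_eq_take_drop_succ, List.take_left' hl, List.drop_left' hl,
      List.drop_eq_getElem_cons h, List.filter_cons]
    have hd' : PySem.Chars.strIsdigit tokens[index].toList = true := by simpa using hd
    simp [hd']
  | case2 index tokens h hd ih =>
    rw [popLoopA]
    simp only [dif_pos h, if_neg hd]
    have hd' : PySem.Chars.strIsdigit tokens[index].toList = false := by simpa using hd
    have hcond : (!PySem.Str.strIsdigit tokens[index]) = true := by simp [hd']
    rw [ih, take_succ_getElem tokens index h, List.drop_eq_getElem_cons h, List.filter_cons,
      if_pos hcond, List.append_assoc]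
    rfl
  | case3 index tokens h =>
    rw [popLoopA]
    simp only [dif_neg h]
    rw [List.drop_eq_nil_of_le (by omega), List.take_of_length_le (by omega)]
    simp

theorem foldB_inv (tokens : List String) (k : Nat) (hk : k ≤ tokens.length) :
    ∃ cur w,
      (List.range k).foldl
        (fun (st : List String × Nat) read =>
          let t := st.1.getD read ""
          if PySem.Str.strIsdigit t then st
          else (st.1.set st.2 t, st.2 + 1)) (tokens, 0) = (cur, w) ∧
      cur.length = tokens.length ∧ w ≤ k ∧
      cur.take w = (tokens.take k).filter (fun t => !PySem.Str.strIsdigit t) ∧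
      cur.drop k = tokens.drop k := by
  induction k with
  | zero => exact ⟨tokens, 0, rfl, rfl, le_rfl, by simp, rfl⟩
  | succ k ih =>
    obtain ⟨cur, w, heq, hlen, hw, htake, hdrop⟩ := ih (by omega)
    have hkl : k < tokens.length := hk
    have hkc : k < cur.length := by omega
    rw [List.range_succ, List.foldl_append, heq]
    simp only [List.foldl_cons, List.foldl_nil]
    have hcurk : cur[k]? = tokens[k]? := by
      have := congrArg (fun l : List String => l[0]?) hdrop
      simpa [List.getElem?_drop] using this
    have hget : cur.getD k "" = tokens[k] := by
      rw [List.getD_eq_getElem?_getD, hcurk, List.getElem?_eq_getElem hkl]; rfl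
    have hgetq : cur[k]?.getD "" = tokens[k] := by
      rw [← List.getD_eq_getElem?_getD]; exact hget
    have ht : tokens.take (k + 1) = tokens.take k ++ [tokens[k]] := take_succ_getElem tokens k hkl
    have hdrop1 : cur.drop (k + 1) = tokens.drop (k + 1) := by
      have h1 : cur.drop (k + 1) = (cur.drop k).drop 1 := by rw [List.drop_drop, Nat.add_comm]
      have h2 : tokens.drop (k + 1) = (tokens.drop k).drop 1 := by rw [List.drop_drop, Nat.add_comm]
      rw [h1, h2, hdrop]
    by_cases hd : PySem.Chars.strIsdigit tokens[k].toList = true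
    · refine ⟨cur, w, by simp [hgetq, hd], hlen, by omega, ?_, hdrop1⟩
      rw [htake, ht, List.filter_append, List.filter_cons]
      simp [hd]
    · have hd' : PySem.Chars.strIsdigit tokens[k].toList = false := by simpa using hd
      have hwlt : w < cur.length := by omega
      refine ⟨cur.set w tokens[k], w + 1, by simp [hgetq, hd'], by simp [hlen], by omega, ?_, ?_⟩
      · have hlw : (cur.take w).length = w := by simp; omega
        rw [List.set_eq_take_append_cons_drop, if_pos hwlt]
        conv_lhs => rw [show w + 1 = (cur.take w).length + 1 from by rw [hlw]]
        rw [List.take_append]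
        rw [htake, ht, List.filter_append, List.filter_cons]
        rw [List.take_of_length_le (by omega)]
        simp [hd']
      · rw [List.drop_set_of_lt (by omega : w < k + 1), hdrop1]

theorem pop_numeric_spec : Claim_equal_pop_numeric := by
  intro tokens _
  unfold Spec_pop_numeric pop_numeric pop_numeric_alt
  obtain ⟨cur, w, heq, hlen, hw, htake, hdrop⟩ := foldB_inv tokens tokens.length le_rfl
  rw [loopA_eq, heq]
  simp at htake ⊢
  simp [htake]
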